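-- pv_equiv track=rewrite | github.com/thereyeslab/Smol-FIESTA | SMol_FIESTA/track_sorting.py | concurrent_count
-- ===== SOURCE A (Python) =====
-- def concurrent_count(tracks, max_concurrent):
--     if isinstance(max_concurrent, str):
--         max_concurrent = 1000000
--     frame_counts = {}
--     for i in range(len(tracks)):
--         track = tracks[i]
--         for f in range(len(track)):
--             frame = track[f][0]
--             if not frame in frame_counts:
--                 frame_counts[frame] = 1
--             else:
--                 frame_counts[frame] += 1
--
--     removal = []
--     que = []
--     frame_keys = sorted(list(frame_counts.keys()))
--     i = 0
--     while i < len(frame_keys):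
--         count = frame_counts[frame_keys[i]]
--         if count > 1:
--             que.append(frame_keys[i])
--         else:
--             if len(que) > 0:
--                 interval = que[-1] - que[0] + 1
--                 if interval > max_concurrent:
--                     removal += que
--                 que = []
--         i += 1
--     if len(que) > 0:
--         interval = que[-1] - que[0] + 1
--         if interval > max_concurrent:
--             removal += que
--     return removal, frame_counts
-- ===== SOURCE B (Python) =====
-- def concurrent_count(tracks, max_concurrent):
--     if isinstance(max_concurrent, str):
--         max_concurrent = 1000000
--     frame_counts = {}
--     for track in tracks:
--         for spot in track:
--             f = spot[0]
--             frame_counts[f] = frame_counts.get(f, 0) + 1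
--     # phase 1: split the sorted distinct frames into maximal runs of equal
--     # "seen more than once" status
--     groups = []
--     for k in sorted(frame_counts):
--         multi = frame_counts[k] > 1
--         if groups and groups[-1][0] == multi:
--             groups[-1][1].append(k)
--         else:
--             groups.append((multi, [k]))
--     # phase 2: keep the multi-runs whose frame span exceeds max_concurrent
--     removal = []
--     for multi, g in groups:
--         if multi and g[-1] - g[0] + 1 > max_concurrent:
--             removal.extend(g)
--     return removal, frame_counts
-- ===== Notes on version B (the rewrite author's own statement) =====
-- stated objective: alternative
-- what changed: Replaces A's streaming queue state-machine over the sorted frame keys by a two-phase decomposition: first materialize the maximal runs of consecutive sorted keys with equal 'count > 1' status, then collect the multi-runs whose frame span exceeds max_concurrent; the count dict is built with dict.get over the elements instead of index loops with a membership branch.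
import Mathlib
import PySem

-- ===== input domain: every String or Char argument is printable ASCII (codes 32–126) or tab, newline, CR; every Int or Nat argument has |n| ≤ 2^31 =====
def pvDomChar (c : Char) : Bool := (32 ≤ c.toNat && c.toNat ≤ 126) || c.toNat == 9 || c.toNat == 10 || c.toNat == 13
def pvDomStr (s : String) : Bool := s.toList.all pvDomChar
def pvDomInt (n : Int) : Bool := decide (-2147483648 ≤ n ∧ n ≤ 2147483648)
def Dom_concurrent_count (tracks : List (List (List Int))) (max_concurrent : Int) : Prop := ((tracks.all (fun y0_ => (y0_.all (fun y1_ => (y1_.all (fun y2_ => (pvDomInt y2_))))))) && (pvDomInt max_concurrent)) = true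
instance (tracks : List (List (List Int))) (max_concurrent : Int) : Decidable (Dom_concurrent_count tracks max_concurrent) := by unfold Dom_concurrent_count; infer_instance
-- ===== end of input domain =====

-- B replaces A's streaming queue state-machine by a two-phase decomposition: first build the
-- maximal runs of sorted distinct frames with equal "count > 1" status, then collect the wide
-- multi-runs (objective: alternative decomposition, no speed claim).
-- max_concurrent is an Int here, so A's isinstance(str) guard is vacuous and is not ported.

-- ===== PORT A =====
-- frame-count loop of A: for i in range(len(tracks)): for f in range(len(track)):
-- frame = track[f][0]; 'if not frame in frame_counts: =1 else: +=1'. The pyGetD defaults are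
-- unreachable inside Pre_ (indices come from range(len), and Pre_ rules out empty spots).
def pvCountsA (tracks : List (List (List Int))) : PySem.Dict Int Int :=
  (PySem.List.pyRange 0 (PySem.List.len tracks)).foldl (fun d i =>
    (PySem.List.pyRange 0 (PySem.List.len (PySem.List.pyGetD tracks i []))).foldl (fun d f =>
      if d.contains (PySem.List.pyGetD (PySem.List.pyGetD (PySem.List.pyGetD tracks i []) f []) 0 0)
      then d.insert (PySem.List.pyGetD (PySem.List.pyGetD (PySem.List.pyGetD tracks i []) f []) 0 0)
             (d.getD (PySem.List.pyGetD (PySem.List.pyGetD (PySem.List.pyGetD tracks i []) f []) 0 0) 0 + 1)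
      else d.insert (PySem.List.pyGetD (PySem.List.pyGetD (PySem.List.pyGetD tracks i []) f []) 0 0) 1) d)
    PySem.Dict.empty

-- one step of A's while loop over frame_keys, state (removal, que);
-- frame_counts[k] is ported as getD (k always comes from the dict's own keys)
def pvStepA (counts : PySem.Dict Int Int) (maxc : Int) (rq : List Int × List Int) (k : Int) :
    List Int × List Int :=
  if counts.getD k 0 > 1 then (rq.1, rq.2 ++ [k])
  else if rq.2.length > 0 then
    (if PySem.List.pyGetD rq.2 (-1) 0 - PySem.List.pyGetD rq.2 0 0 + 1 > maxc
     then (rq.1 ++ rq.2, []) else (rq.1, []))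
  else rq

-- A's trailing 'if len(que) > 0: …' after the while loop, on the final (removal, que)
def pvFinishA (maxc : Int) (rq : List Int × List Int) : List Int :=
  if rq.2.length > 0 then
    (if PySem.List.pyGetD rq.2 (-1) 0 - PySem.List.pyGetD rq.2 0 0 + 1 > maxc
     then rq.1 ++ rq.2 else rq.1)
  else rq.1

def concurrent_count (tracks : List (List (List Int))) (max_concurrent : Int) :
    List Int × (List (Int × Int)) :=
  let counts := pvCountsA tracks
  let frame_keys := PySem.List.sorted counts.keys (fun x => x) false
  (pvFinishA max_concurrent (frame_keys.foldl (pvStepA counts max_concurrent) ([], [])),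
   counts.items)

-- ===== PORT B =====
-- B's count loop: for track in tracks: for spot in track: d[f] = d.get(f, 0) + 1
def pvCountsB (tracks : List (List (List Int))) : PySem.Dict Int Int :=
  tracks.foldl (fun d track =>
    track.foldl (fun d spot =>
      d.insert (PySem.List.pyGetD spot 0 0)
        (d.getD (PySem.List.pyGetD spot 0 0) 0 + 1)) d)
    PySem.Dict.empty

-- phase 1 step: Python appends at the end of `groups` and extends groups[-1];
-- here the open (= last) group is kept at the HEAD and the list is reversed afterwards
def pvGroupStep (counts : PySem.Dict Int Int) (gs : List (Bool × List Int)) (k : Int) :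
    List (Bool × List Int) :=
  let multi := decide (counts.getD k 0 > 1)
  match gs with
  | [] => [(multi, [k])]
  | (m, g) :: rest => if m == multi then (m, g ++ [k]) :: rest else (multi, [k]) :: (m, g) :: rest

-- phase 2 step: removal.extend(g) when multi and the span is wide
def pvCollectStep (maxc : Int) (r : List Int) (mg : Bool × List Int) : List Int :=
  if mg.1 && decide (PySem.List.pyGetD mg.2 (-1) 0 - PySem.List.pyGetD mg.2 0 0 + 1 > maxc)
  then r ++ mg.2 else r

def concurrent_count_alt (tracks : List (List (List Int))) (max_concurrent : Int) :
    List Int × (List (Int × Int)) :=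
  let counts := pvCountsB tracks
  let groups := ((PySem.List.sorted counts.keys (fun x => x) false).foldl
                  (pvGroupStep counts) []).reverse
  (groups.foldl (pvCollectStep max_concurrent) [], counts.items)

-- ===== PRECONDITION & SPEC =====
-- Pre_ excludes inputs containing an empty spot list, on which A raises IndexError at track[f][0].
def Pre_concurrent_count (tracks : List (List (List Int))) (max_concurrent : Int) : Prop :=
  ∀ track ∈ tracks, ∀ spot ∈ track, spot ≠ []
instance (tracks : List (List (List Int))) (max_concurrent : Int) : Decidable (Pre_concurrent_count tracks max_concurrent) := by unfold Pre_concurrent_count; infer_instance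

def pvWitness_concurrent_count : List (List (List Int)) × Int := ([[[1, 0], [2, 0]], [[1, 5]], [[2]], [[4]]], 1)

def Spec_concurrent_count (tracks : List (List (List Int))) (max_concurrent : Int) (out : List Int × (List (Int × Int))) : Prop := out = concurrent_count_alt tracks max_concurrent
instance (tracks : List (List (List Int))) (max_concurrent : Int) (out : List Int × (List (Int × Int))) : Decidable (Spec_concurrent_count tracks max_concurrent out) := by unfold Spec_concurrent_count; infer_instance

-- ===== CLAIM (what is proved, stated in full; the proofs are below) =====
def Claim_equal_concurrent_count : Prop := ∀ (tracks : List (List (List Int))) (max_concurrent : Int), Dom_concurrent_count tracks max_concurrent → Pre_concurrent_count tracks max_concurrent → Spec_concurrent_count tracks max_concurrent (concurrent_count tracks max_concurrent)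

-- ===== LEMMAS AND PROOFS =====

-- the two count loops build the same dict
lemma counts_eq (tracks : List (List (List Int))) : pvCountsA tracks = pvCountsB tracks := by
  unfold pvCountsA pvCountsB
  refine Eq.trans (PySem.List.foldl_pyRange_zero_pyGetD' tracks []
    (fun d track =>
      (PySem.List.pyRange 0 (PySem.List.len track)).foldl (fun d f =>
        if d.contains (PySem.List.pyGetD (PySem.List.pyGetD track f []) 0 0)
        then d.insert (PySem.List.pyGetD (PySem.List.pyGetD track f []) 0 0)
               (d.getD (PySem.List.pyGetD (PySem.List.pyGetD track f []) 0 0) 0 + 1)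
        else d.insert (PySem.List.pyGetD (PySem.List.pyGetD track f []) 0 0) 1) d)
    (PySem.Dict.empty : PySem.Dict Int Int)) ?_
  refine PySem.List.foldl_congr_mem tracks _ _ _ (fun d track _ => ?_)
  refine Eq.trans (PySem.List.foldl_pyRange_zero_pyGetD' track []
    (fun d spot =>
      if d.contains (PySem.List.pyGetD spot 0 0)
      then d.insert (PySem.List.pyGetD spot 0 0) (d.getD (PySem.List.pyGetD spot 0 0) 0 + 1)
      else d.insert (PySem.List.pyGetD spot 0 0) 1) d) ?_
  refine PySem.List.foldl_congr_mem track _ _ _ (fun d spot _ => ?_)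
  by_cases h : d.contains (PySem.List.pyGetD spot 0 0)
  · simp [h]
  · simp only [h, Bool.false_eq_true, if_false]
    rw [PySem.Dict.getD_of_not_contains _ _ (by simpa using h)]
    norm_num

-- the value a single group contributes to removal
def pvEmit (maxc : Int) (mg : Bool × List Int) : List Int :=
  if mg.1 && decide (PySem.List.pyGetD mg.2 (-1) 0 - PySem.List.pyGetD mg.2 0 0 + 1 > maxc)
  then mg.2 else []

lemma collect_eq_flatMap (maxc : Int) (gs : List (Bool × List Int)) (r : List Int) :
    gs.foldl (pvCollectStep maxc) r = r ++ gs.flatMap (pvEmit maxc) := by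
  induction gs generalizing r with
  | nil => simp
  | cons g gs ih =>
    simp only [List.foldl_cons, List.flatMap_cons, ih]
    unfold pvCollectStep pvEmit
    split <;> simp

-- the group-builder only ever touches the head of its accumulator
lemma groupStep_split (counts : PySem.Dict Int Int) (ks : List Int)
    (h : Bool × List Int) (t : List (Bool × List Int)) :
    ks.foldl (pvGroupStep counts) (h :: t) = ks.foldl (pvGroupStep counts) [h] ++ t := by
  induction ks generalizing h t with
  | nil => simp
  | cons k ks ih =>
    simp only [List.foldl_cons]
    obtain ⟨m, g⟩ := h
    by_cases hm : m == decide (counts.getD k 0 > 1)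
    · simp only [pvGroupStep, hm, if_true]
      exact ih _ _
    · simp only [pvGroupStep, hm, Bool.false_eq_true, if_false]
      rw [ih _ ((m, g) :: t), ih _ [(m, g)]]
      simp

-- B's output from accumulator acc after consuming ks
def pvOut (counts : PySem.Dict Int Int) (maxc : Int) (ks : List Int)
    (acc : List (Bool × List Int)) : List Int :=
  ((ks.foldl (pvGroupStep counts) acc).reverse).flatMap (pvEmit maxc)

-- an open False-group never contributes: it can be dropped from the accumulator
lemma out_false_head (counts : PySem.Dict Int Int) (maxc : Int) (ks : List Int)
    (g : List Int) : pvOut counts maxc ks [(false, g)] = pvOut counts maxc ks [] := by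
  induction ks generalizing g with
  | nil => simp [pvOut, pvEmit]
  | cons k ks ih =>
    by_cases hp : counts.getD k 0 > 1
    · have hg : pvGroupStep counts [(false, g)] k = [(true, [k]), (false, g)] := by
        simp [pvGroupStep, hp]
      have hg0 : pvGroupStep counts [] k = [(true, [k])] := by
        simp [pvGroupStep, hp]
      unfold pvOut
      simp only [List.foldl_cons, hg, hg0]
      rw [groupStep_split counts ks (true, [k]) [(false, g)]]
      simp [pvEmit]
    · have hg : pvGroupStep counts [(false, g)] k = [(false, g ++ [k])] := by
        simp [pvGroupStep, hp]
      have hg0 : pvGroupStep counts [] k = [(false, [k])] := by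
        simp [pvGroupStep, hp]
      unfold pvOut
      simp only [List.foldl_cons, hg, hg0]
      have h1 := ih (g ++ [k])
      have h2 := ih [k]
      simp only [pvOut] at h1 h2
      rw [h1, h2]

-- the pending que of A corresponds to an open True-group of B
def pvPend (que : List Int) : List (Bool × List Int) :=
  if que = [] then [] else [(true, que)]

-- main invariant: A's loop + trailing flush = removal so far + B's remaining output
lemma main_inv (counts : PySem.Dict Int Int) (maxc : Int) (ks : List Int) :
    ∀ removal que,
      pvFinishA maxc (ks.foldl (pvStepA counts maxc) (removal, que))
        = removal ++ pvOut counts maxc ks (pvPend que) := by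
  induction ks with
  | nil =>
    intro removal que
    rcases que with _ | ⟨q, qs⟩
    · simp [pvFinishA, pvPend, pvOut]
    · simp only [List.foldl_nil, pvFinishA, pvPend, pvOut,
        reduceCtorEq, if_false, List.reverse_cons, List.reverse_nil, List.nil_append,
        List.flatMap_cons, List.flatMap_nil, List.append_nil, pvEmit,
        List.length_cons, Nat.zero_lt_succ, if_true, Bool.true_and, decide_eq_true_eq]
      split <;> simp_all
  | cons k ks ih =>
    intro removal que
    by_cases hp : counts.getD k 0 > 1
    · -- A appends k to que; B extends (or opens) the True-group
      have hA : pvStepA counts maxc (removal, que) k = (removal, que ++ [k]) := by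
        simp [pvStepA, hp]
      rw [List.foldl_cons, hA, ih removal (que ++ [k])]
      rcases que with _ | ⟨q, qs⟩
      · simp [pvPend, pvOut, pvGroupStep, hp]
      · simp [pvPend, pvOut, pvGroupStep, hp]
    · rcases que with _ | ⟨q, qs⟩
      · -- que empty: nothing to flush; B opens a False-group that never contributes
        have hA : pvStepA counts maxc (removal, []) k = (removal, []) := by
          simp [pvStepA, hp]
        rw [List.foldl_cons, hA, ih removal []]
        have h0 := out_false_head counts maxc ks [k]
        simp only [pvOut] at h0 ⊢
        have hg0 : pvGroupStep counts [] k = [(false, [k])] := by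
          simp [pvGroupStep, hp]
        simp only [pvPend, if_true, List.foldl_cons, hg0]
        rw [h0]
      · -- que nonempty: A flushes; B closes the True-group behind a new False-group
        have hB : pvOut counts maxc (k :: ks) (pvPend (q :: qs))
            = pvEmit maxc (true, q :: qs) ++ pvOut counts maxc ks [] := by
          have hg : pvGroupStep counts [(true, q :: qs)] k = [(false, [k]), (true, q :: qs)] := by
            simp [pvGroupStep, hp]
          unfold pvOut
          simp only [pvPend, reduceCtorEq, if_false, List.foldl_cons, hg]
          rw [groupStep_split counts ks (false, [k]) [(true, q :: qs)]]
          have h0 := out_false_head counts maxc ks [k]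
          simp only [pvOut] at h0
          simp [h0]
        rw [hB]
        have hA : pvStepA counts maxc (removal, q :: qs) k
            = (removal ++ pvEmit maxc (true, q :: qs), []) := by
          simp only [pvStepA, pvEmit, hp, if_false,
            List.length_cons, Nat.zero_lt_succ, if_true, Bool.true_and, decide_eq_true_eq]
          split <;> simp_all
        rw [List.foldl_cons, hA, ih (removal ++ pvEmit maxc (true, q :: qs)) []]
        simp [pvPend]

-- ===== VERDICT (by name: the statement is the Claim_ definition above) =====
theorem concurrent_count_spec : Claim_equal_concurrent_count := by
  intro tracks maxc _ _
  simp only [Spec_concurrent_count, concurrent_count, concurrent_count_alt]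
  rw [← counts_eq, Prod.mk.injEq]
  refine ⟨?_, rfl⟩
  have h := main_inv (pvCountsA tracks) maxc
    (PySem.List.sorted (pvCountsA tracks).keys (fun x => x) false) [] []
  simp only [pvPend, if_true, List.nil_append] at h
  rw [h, collect_eq_flatMap]
  simp only [List.nil_append]
  rfl
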